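-- pv_equiv track=rewrite | github.com/cstraton/airrmap | server/airrmap/application/reporting.py | squeeze_gapped_seqs
-- ===== SOURCE A (Python) =====
-- from typing import Any, Dict, List, Optional
--
-- def squeeze_gapped_seqs(gapped_seq_list: List[List], min_gap_chars=2, gap_char='.') -> List:
--     """
--     Squeezes gapped strings / removes excess gaps.
--
--     Assumes all gaps for each sequence are always together
--     (i.e. the center of the sequence).
--
--     Parameters
--     ----------
--     gapped_seq_list : List[List]
--         List of gapped strings. Items should be
--         a list of 2 elements:
--         [gapped_sequence, measure_value].
--
--     min_gap_chars : int, optional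
--         Minimum number of gap characters that should remain after
--         being squeezed. If any sequences had less gaps
--         originally, this has no effect. By default, 2.
--
--     gap_char : str, optional
--         The gap character, by default '.'
--
--     Returns
--     -------
--     List
--         Either the original list if no changes were made,
--         or the sequences with excess gaps removed.
--         Note the latter will return a list of tuples due
--         to use of the zip function.
--     """
--
--     SEQ_ELEMENT = 0
--     MEASURE_ELEMENT = 1
--
--     # First pass, get the minimum number of consecutive gap characters
--     # across all sequences.
--     min_consecutive_gaps_found = 888
--     for gapped_seq in gapped_seq_list:
--         max_consecutive_gaps_found = 0
--         consecutive_gaps = 0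
--         for char in gapped_seq[SEQ_ELEMENT]:  # ['GGG..GG', 1] seq,redundancy
--             if char == gap_char:
--                 consecutive_gaps += 1
--                 if consecutive_gaps > max_consecutive_gaps_found:
--                     max_consecutive_gaps_found = consecutive_gaps
--             else:
--                 consecutive_gaps = 0
--         if max_consecutive_gaps_found < min_consecutive_gaps_found:
--             min_consecutive_gaps_found = max_consecutive_gaps_found
--
--     # Remove excess gaps (find-replace only once, not all occurrences)
--     num_gaps_to_remove = min_consecutive_gaps_found - min_gap_chars
--     if num_gaps_to_remove > 0:
--         find_text = gap_char * num_gaps_to_remove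
--         seqs_adjusted = [seq[SEQ_ELEMENT].replace(
--             find_text, '', 1) for seq in gapped_seq_list]
--         measure_values = [x[MEASURE_ELEMENT] for x in gapped_seq_list]
--         assert len(seqs_adjusted) == len(
--             measure_values), 'Number of sequences and measure values should be the same.'
--         return list(zip(seqs_adjusted, measure_values))
--
--     else:
--         return gapped_seq_list
-- ===== SOURCE B (Python) =====
-- def squeeze_gapped_seqs(gapped_seq_list, min_gap_chars=2, gap_char='.'):
--     """Gap-position bucketing: collect the indices of gap characters, bucket
--     them by (position - rank) so that each bucket is exactly one maximal gap
--     run, and take the largest bucket as the longest run; the minimum across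
--     sequences then feeds the same one-shot find-replace."""
--
--     def max_gap_run(s):
--         positions = [p for p, ch in enumerate(s) if ch == gap_char]
--         buckets = {}
--         for i, p in enumerate(positions):
--             key = p - i
--             buckets[key] = buckets.get(key, 0) + 1
--         return max(buckets.values(), default=0)
--
--     min_run = 888
--     for seq in gapped_seq_list:
--         min_run = min(min_run, max_gap_run(seq[0]))
--
--     num_gaps_to_remove = min_run - min_gap_chars
--     if num_gaps_to_remove <= 0:
--         return gapped_seq_list
--     find_text = gap_char * num_gaps_to_remove
--     return [(seq[0].replace(find_text, '', 1), seq[1]) for seq in gapped_seq_list]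
-- ===== Notes on version B (the rewrite author's own statement) =====
-- stated objective: alternative
-- what changed: A scans each string with a running consecutive-gap counter; B instead extracts the list of gap-character positions and buckets them in a dict keyed by (position - rank), so each bucket is exactly one maximal gap run and the longest run is the largest bucket value; the minimum across sequences then feeds the same one-shot find-replace.
import Mathlib
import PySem

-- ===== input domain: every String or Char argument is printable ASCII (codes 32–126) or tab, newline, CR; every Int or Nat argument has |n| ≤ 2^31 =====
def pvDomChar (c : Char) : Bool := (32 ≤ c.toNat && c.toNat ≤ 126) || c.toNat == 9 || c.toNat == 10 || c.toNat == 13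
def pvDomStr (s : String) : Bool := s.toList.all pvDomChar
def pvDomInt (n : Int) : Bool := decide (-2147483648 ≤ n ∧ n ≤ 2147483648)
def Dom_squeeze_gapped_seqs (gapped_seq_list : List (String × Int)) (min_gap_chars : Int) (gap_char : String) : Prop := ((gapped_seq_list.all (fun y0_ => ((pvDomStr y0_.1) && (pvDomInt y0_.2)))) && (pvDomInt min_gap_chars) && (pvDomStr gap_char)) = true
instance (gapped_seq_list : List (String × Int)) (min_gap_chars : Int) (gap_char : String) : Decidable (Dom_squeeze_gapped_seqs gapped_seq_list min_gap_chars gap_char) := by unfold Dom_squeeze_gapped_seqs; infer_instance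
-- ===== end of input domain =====

-- B replaces A's per-character consecutive-gap counter by gap-position bucketing:
-- it collects the indices of the gap characters and buckets them in a dict keyed by
-- (position - rank), so each bucket is one maximal gap run and the longest run is the
-- largest bucket value; same cost (objective: alternative).

-- shared hand port of Python's `s.replace(old, '', 1)` (both Pythons call it):
-- exact — deletes the first occurrence of `old` (PySem.Chars.find points at it;
-- old = '' deletes nothing, matching CPython).
def pvReplaceOnceDel (cs old : List Char) : List Char :=
  let i := PySem.Chars.find cs old
  if i = -1 then cs else cs.take i.toNat ++ cs.drop (i.toNat + old.length)

-- shared hand port of Python's `gap_char * n` (n ≥ 0): exact string repetition.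
def pvStrRepeat (cs : List Char) (n : Nat) : List Char := (List.replicate n cs).flatten

-- ===== PORT A =====
-- the body of A's inner `for char in gapped_seq[SEQ_ELEMENT]` loop; state = (max_consecutive_gaps_found, consecutive_gaps)
def sgsStep (gap_char : String) (acc : Int × Int) (ch : Char) : Int × Int :=
  if String.singleton ch == gap_char then
    let cg := acc.2 + 1
    (if cg > acc.1 then cg else acc.1, cg)
  else (acc.1, 0)

def squeeze_gapped_seqs (gapped_seq_list : List (String × Int)) (min_gap_chars : Int) (gap_char : String) : List (String × Int) :=
  -- first pass: minimum over sequences of the max consecutive gap count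
  let min_found := gapped_seq_list.foldl (fun mn p =>
      let mx := (p.1.toList.foldl (sgsStep gap_char) (0, 0)).1
      if mx < mn then mx else mn) 888
  let num_gaps_to_remove := min_found - min_gap_chars
  if num_gaps_to_remove > 0 then
    let find_text := pvStrRepeat gap_char.toList num_gaps_to_remove.toNat
    let seqs_adjusted := gapped_seq_list.map (fun p => String.ofList (pvReplaceOnceDel p.1.toList find_text))
    let measure_values := gapped_seq_list.map (fun p => p.2)
    seqs_adjusted.zip measure_values
  else gapped_seq_list

-- ===== PORT B =====
-- Source B's `positions` comprehension followed by the `key = p - i` bucket keys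
def gapKeys (gap_char : String) (cs : List Char) : List Int :=
  let positions := ((PySem.List.enumerate cs).filter (fun q => String.singleton q.2 == gap_char)).map (fun q => q.1)
  (PySem.List.enumerate positions).map (fun q => q.2 - q.1)

-- Source B's `max_gap_run`: build the buckets dict, return max of its values (default 0)
def maxGapRunB (gap_char : String) (cs : List Char) : Int :=
  let buckets := (gapKeys gap_char cs).foldl (fun d k => d.insert k (d.getD k 0 + 1)) PySem.Dict.empty
  PySem.List.maxD buckets.values (fun v => v) 0

def squeeze_gapped_seqs_alt (gapped_seq_list : List (String × Int)) (min_gap_chars : Int) (gap_char : String) : List (String × Int) :=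
  let min_run := gapped_seq_list.foldl (fun mn p => min mn (maxGapRunB gap_char p.1.toList)) 888
  let num_gaps_to_remove := min_run - min_gap_chars
  if num_gaps_to_remove ≤ 0 then gapped_seq_list
  else
    let find_text := pvStrRepeat gap_char.toList num_gaps_to_remove.toNat
    gapped_seq_list.map (fun p => (String.ofList (pvReplaceOnceDel p.1.toList find_text), p.2))

-- ===== PRECONDITION & SPEC =====
def Spec_squeeze_gapped_seqs (gapped_seq_list : List (String × Int)) (min_gap_chars : Int) (gap_char : String) (out : List (String × Int)) : Prop := out = squeeze_gapped_seqs_alt gapped_seq_list min_gap_chars gap_char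
instance (gapped_seq_list : List (String × Int)) (min_gap_chars : Int) (gap_char : String) (out : List (String × Int)) : Decidable (Spec_squeeze_gapped_seqs gapped_seq_list min_gap_chars gap_char out) := by unfold Spec_squeeze_gapped_seqs; infer_instance

-- ===== CLAIM (what is proved, stated in full; the proofs are below) =====
def Claim_equal_squeeze_gapped_seqs : Prop := ∀ (gapped_seq_list : List (String × Int)) (min_gap_chars : Int) (gap_char : String), Dom_squeeze_gapped_seqs gapped_seq_list min_gap_chars gap_char → Spec_squeeze_gapped_seqs gapped_seq_list min_gap_chars gap_char (squeeze_gapped_seqs gapped_seq_list min_gap_chars gap_char)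

-- ===== LEMMAS AND PROOFS =====

-- proof-side recursive characterisation of B's bucket keys: position pos, gap rank t
def keysSpec (g : String) : List Char → Int → Int → List Int
  | [], _, _ => []
  | c :: rest, pos, t =>
      if String.singleton c == g then (pos - t) :: keysSpec g rest (pos + 1) (t + 1)
      else keysSpec g rest (pos + 1) t

-- proof-side list of maximal-gap-run lengths, left to right
def runLens (g : String) : List Char → List Int
  | [] => []
  | c :: rest =>
      if String.singleton c == g then
        ((rest.takeWhile (· == c)).length + 1 : Int) :: runLens g (rest.dropWhile (· == c))
      else runLens g rest
termination_by cs => cs.length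
decreasing_by
  · simp only [List.length_cons]
    exact Nat.lt_succ_of_le (List.length_dropWhile_le _ _)
  · simp

-- B's enumerate/filter/enumerate pipeline computes keysSpec
theorem keysSpec_eq (g : String) (cs : List Char) : ∀ (pos t : Int),
    (PySem.List.enumerate (((PySem.List.enumerate cs pos).filter (fun q => String.singleton q.2 == g)).map (fun q => q.1)) t).map (fun q => q.2 - q.1) = keysSpec g cs pos t := by
  induction cs with
  | nil => intro pos t; simp [keysSpec, PySem.List.enumerate_nil]
  | cons c rest ih =>
    intro pos t
    rw [PySem.List.enumerate_cons]
    by_cases hg : (String.singleton c == g) = true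
    · simp only [List.filter_cons, hg, if_true, List.map_cons,
        PySem.List.enumerate_cons, keysSpec]
      rw [ih (pos + 1) (t + 1)]
    · simp only [List.filter_cons, hg, Bool.false_eq_true, if_false, keysSpec]
      rw [ih (pos + 1) t]

theorem gapKeys_eq (g : String) (cs : List Char) : gapKeys g cs = keysSpec g cs 0 0 := by
  unfold gapKeys
  exact keysSpec_eq g cs 0 0

-- a run of gap characters contributes one constant bucket key, repeated
theorem keysSpec_gap_run (g : String) (u : List Char) : ∀ (v : List Char) (pos t : Int),
    (∀ ch ∈ u, (String.singleton ch == g) = true) →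
    keysSpec g (u ++ v) pos t = List.replicate u.length (pos - t) ++ keysSpec g v (pos + u.length) (t + u.length) := by
  induction u with
  | nil => intro v pos t _; simp
  | cons a u ih =>
    intro v pos t hall
    have ha : (String.singleton a == g) = true := hall a (by simp)
    simp only [List.cons_append, keysSpec, ha, if_pos, List.length_cons, List.replicate_succ]
    rw [ih v (pos + 1) (t + 1) (fun ch hch => hall ch (by simp [hch]))]
    have h1 : pos + 1 - (t + 1) = pos - t := by ring
    have h2 : pos + 1 + (u.length : Int) = pos + ((u.length : Int) + 1) := by ring
    have h3 : t + 1 + (u.length : Int) = t + ((u.length : Int) + 1) := by ring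
    rw [h1, h2, h3]
    push_cast
    ring_nf

-- every bucket key of a suffix is at least pos - t
theorem keysSpec_lb (g : String) (cs : List Char) : ∀ (pos t k : Int), k ∈ keysSpec g cs pos t → pos - t ≤ k := by
  induction cs with
  | nil => intro pos t k hk; simp [keysSpec] at hk
  | cons c rest ih =>
    intro pos t k hk
    simp only [keysSpec] at hk
    split at hk
    · rcases List.mem_cons.mp hk with h | h
      · omega
      · have := ih (pos + 1) (t + 1) k h; omega
    · have := ih (pos + 1) t k hk; omega

theorem discard_of_not_mem {α : Type} [BEq α] [LawfulBEq α] (s : List α) (x : α) (h : x ∉ s) : PySem.Set.discard s x = s := by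
  unfold PySem.Set.discard
  apply List.filter_eq_self.mpr
  intro y hy
  simp only [Bool.not_eq_eq_eq_not, Bool.not_true, beq_eq_false_iff_ne]
  exact fun hyx => h (hyx ▸ hy)

theorem ofList_replicate_append (k : Int) (rest : List Int) (h : k ∉ rest) : ∀ (l : Nat),
    PySem.Set.ofList (List.replicate (l + 1) k ++ rest) = k :: PySem.Set.ofList rest := by
  intro l
  induction l with
  | zero =>
    have h0 : List.replicate (0 + 1) k ++ rest = k :: rest := by simp
    rw [h0, PySem.Set.ofList_cons]
    rw [discard_of_not_mem _ _ (by simpa [PySem.Set.mem_ofList] using h)]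
  | succ l ih =>
    have : List.replicate (l + 1 + 1) k ++ rest = k :: (List.replicate (l + 1) k ++ rest) := by
      simp [List.replicate_succ]
    rw [this, PySem.Set.ofList_cons, ih]
    congr 1
    have hstep : PySem.Set.discard (k :: PySem.Set.ofList rest) k = PySem.Set.discard (PySem.Set.ofList rest) k := by
      unfold PySem.Set.discard
      simp
    rw [hstep, discard_of_not_mem _ _ (by simpa [PySem.Set.mem_ofList] using h)]

-- a block of l+1 equal keys followed by keys avoiding it contributes one bucket of size l+1
theorem counter_values_replicate_append (k : Int) (l : Nat) (rest : List Int) (h : k ∉ rest) :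
    (PySem.Dict.counter (List.replicate (l + 1) k ++ rest)).values = ((l : Int) + 1) :: (PySem.Dict.counter rest).values := by
  unfold PySem.Dict.values
  rw [PySem.Dict.items_counter, PySem.Dict.items_counter]
  rw [ofList_replicate_append k rest h l]
  simp only [List.map_cons, List.map_map]
  congr 1
  · rw [List.count_append, List.count_replicate, List.count_eq_zero_of_not_mem h]
    simp only [beq_self_eq_true, if_true]
    push_cast; ring
  · apply List.map_congr_left
    intro a ha
    have hak : a ≠ k := fun hak => h (hak ▸ ((PySem.Set.mem_ofList _ _).mp ha))
    simp only [Function.comp_apply]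
    rw [List.count_append, List.count_replicate, if_neg (by simpa using hak.symm)]
    simp

-- the buckets dict's values, in order, are exactly the maximal gap-run lengths
theorem counter_keysSpec_values (g : String) : ∀ (n : Nat) (cs : List Char), cs.length ≤ n → ∀ (pos t : Int),
    (PySem.Dict.counter (keysSpec g cs pos t)).values = runLens g cs := by
  intro n
  induction n with
  | zero =>
    intro cs hcs pos t
    have : cs = [] := List.eq_nil_of_length_eq_zero (by omega)
    subst this
    simp [keysSpec, runLens, PySem.Dict.counter, PySem.Dict.values, PySem.Dict.empty]
  | succ n ih =>
    intro cs hcs pos t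
    match cs with
    | [] => simp [keysSpec, runLens, PySem.Dict.counter, PySem.Dict.values, PySem.Dict.empty]
    | c :: rest =>
      by_cases hg : (String.singleton c == g) = true
      · -- gap run: c together with takeWhile (· == c) rest
        have hrl : runLens g (c :: rest)
            = (((rest.takeWhile (· == c)).length : Int) + 1) :: runLens g (rest.dropWhile (· == c)) := by
          rw [runLens]
          simp only [hg, if_true]
        rw [hrl]
        have hall : ∀ ch ∈ c :: rest.takeWhile (· == c), (String.singleton ch == g) = true := by
          intro ch hch
          rcases List.mem_cons.mp hch with h | h
          · exact h ▸ hg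
          · have : ch = c := by simpa using List.mem_takeWhile_imp (p := (· == c)) h
            exact this ▸ hg
        have hsplit : c :: rest = (c :: rest.takeWhile (· == c)) ++ rest.dropWhile (· == c) := by
          rw [List.cons_append, List.takeWhile_append_dropWhile]
        conv_lhs => rw [hsplit]
        rw [keysSpec_gap_run g (c :: rest.takeWhile (· == c)) _ pos t hall]
        simp only [List.length_cons]
        have hknot : (pos - t) ∉ keysSpec g (rest.dropWhile (· == c))
            (pos + (((rest.takeWhile (· == c)).length + 1 : Nat) : Int))
            (t + (((rest.takeWhile (· == c)).length + 1 : Nat) : Int)) := by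
          cases hd : rest.dropWhile (· == c) with
          | nil => simp [keysSpec]
          | cons h' tl =>
            have hne : (h' == c) = false := by
              have h1 := List.head_dropWhile_not (p := (· == c)) (l := rest) (by simp [hd])
              have h2 : ((rest.dropWhile (· == c)).head (by simp [hd])) = h' := by simp [hd]
              rw [h2] at h1; simpa using h1
            have hng : (String.singleton h' == g) = false := by
              by_contra hcon
              have h1 : String.singleton h' = g := eq_of_beq (by simpa using hcon)
              have h2 : String.singleton c = g := eq_of_beq hg
              have : h' = c := by
                have := congrArg String.toList (h1.trans h2.symm)
                simpa using this
              simp [this] at hne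
            intro hmem
            simp only [keysSpec, hng, Bool.false_eq_true, if_false] at hmem
            have := keysSpec_lb g tl _ _ _ hmem
            omega
        rw [counter_values_replicate_append _ _ _ hknot]
        have hlenv : (rest.dropWhile (· == c)).length ≤ n := by
          have h1 := List.length_dropWhile_le (· == c) rest
          simp only [List.length_cons] at hcs
          omega
        rw [ih _ hlenv _ _]
      · -- non-gap head: no key, no run
        simp only [keysSpec, hg, Bool.false_eq_true, if_false]
        rw [ih rest (by simp only [List.length_cons] at hcs; omega) _ _]
        rw [runLens]
        simp [hg]

-- === A-side: the scan equals the running max of the run lengths ===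

-- A's scan decomposes: the running max only caps the tail's result
theorem sgs_scan_decomp (g : String) (cs : List Char) : ∀ (m c : Int), 0 ≤ c → c ≤ m →
    (cs.foldl (sgsStep g) (m, c)).1 = max m ((cs.foldl (sgsStep g) (c, c)).1) := by
  induction cs with
  | nil => intro m c _ h; simp; omega
  | cons a cs ih =>
    intro m c h0 hcm
    simp only [List.foldl_cons, sgsStep]
    split
    · have h1 : (if c + 1 > m then c + 1 else m) = max m (c + 1) := by omega
      have h2 : (if c + 1 > c then c + 1 else c) = c + 1 := by omega
      rw [h1, h2]
      rw [ih (max m (c+1)) (c+1) (by omega) (by omega)]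
      rw [ih (c+1) (c+1) (by omega) (by omega)]
      have : (c + 1) ≤ ((cs.foldl (sgsStep g) (c + 1, c + 1)).1) ∨ True := Or.inr trivial
      -- monotonicity: m' ≤ scan from (m', c')
      have hmono : ∀ (l : List Char) (m' c' : Int), m' ≤ (l.foldl (sgsStep g) (m', c')).1 := by
        intro l
        induction l with
        | nil => intro m' c'; simp
        | cons b l ihl =>
          intro m' c'
          simp only [List.foldl_cons, sgsStep]
          split
          · split
            · exact le_trans (by omega) (ihl _ _)
            · exact ihl _ _
          · exact ihl _ _
      have := hmono cs (c+1) (c+1)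
      omega
    · rw [ih m 0 (by omega) (by omega), ih c 0 (by omega) (by omega)]
      omega

-- absorbing a run of gap characters into the carried counter
theorem sgs_scan_gap_run (g : String) (t : List Char) : ∀ (rs : List Char) (c : Int),
    (∀ ch ∈ t, (String.singleton ch == g) = true) →
    ((t ++ rs).foldl (sgsStep g) (c, c)).1 = (rs.foldl (sgsStep g) ((c + t.length), (c + t.length))).1 := by
  induction t with
  | nil => intro rs c _; simp
  | cons a t ih =>
    intro rs c hall
    have ha : (String.singleton a == g) = true := hall a (by simp)
    simp only [List.cons_append, List.foldl_cons, sgsStep, ha, if_pos, List.length_cons]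
    have h2 : (if c + 1 > c then c + 1 else c) = c + 1 := by omega
    simp only [h2]
    rw [ih rs (c+1) (fun ch hch => hall ch (by simp [hch]))]
    norm_num
    ring_nf

theorem foldl_max_max (xs : List Int) : ∀ (a b : Int), xs.foldl max (max a b) = max a (xs.foldl max b) := by
  induction xs with
  | nil => intro a b; simp
  | cons x xs ih =>
    intro a b
    simp only [List.foldl_cons]
    rw [max_assoc, ih]

-- A's scan from (0,0) computes the running max of the run lengths
theorem sgs_scan_eq_runLens (g : String) : ∀ (n : Nat) (cs : List Char), cs.length ≤ n →
    (cs.foldl (sgsStep g) (0, 0)).1 = (runLens g cs).foldl max 0 := by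
  intro n
  induction n with
  | zero =>
    intro cs hcs
    have : cs = [] := List.eq_nil_of_length_eq_zero (by omega)
    subst this
    simp [runLens]
  | succ n ih =>
    intro cs hcs
    match cs with
    | [] => simp [runLens]
    | c :: rest =>
      by_cases hg : (String.singleton c == g) = true
      · have hall : ∀ ch ∈ rest.takeWhile (· == c), (String.singleton ch == g) = true := by
          intro ch hch
          have : ch = c := by simpa using List.mem_takeWhile_imp (p := (· == c)) hch
          exact this ▸ hg
        have hstep : ((c :: rest).foldl (sgsStep g) (0, 0)).1
            = ((rest.takeWhile (· == c) ++ rest.dropWhile (· == c)).foldl (sgsStep g) (1, 1)).1 := by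
          rw [List.takeWhile_append_dropWhile]
          simp [sgsStep, hg]
        rw [hstep, sgs_scan_gap_run g _ _ 1 hall]
        have hrl : runLens g (c :: rest)
            = (((rest.takeWhile (· == c)).length : Int) + 1) :: runLens g (rest.dropWhile (· == c)) := by
          rw [runLens]
          simp only [hg, if_true]
        rw [hrl]
        have hfold : ((((rest.takeWhile (· == c)).length : Int) + 1) :: runLens g (rest.dropWhile (· == c))).foldl max 0
            = max (((rest.takeWhile (· == c)).length : Int) + 1) ((runLens g (rest.dropWhile (· == c))).foldl max 0) := by
          simp only [List.foldl_cons]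
          rw [show max (0 : Int) (((rest.takeWhile (· == c)).length : Int) + 1)
              = max (((rest.takeWhile (· == c)).length : Int) + 1) 0 from max_comm _ _]
          exact foldl_max_max (runLens g (rest.dropWhile (· == c))) _ 0
        rw [hfold]
        cases hd : rest.dropWhile (· == c) with
        | nil =>
          simp [runLens]
          omega
        | cons h' tl =>
          have hne : (h' == c) = false := by
            have h1 := List.head_dropWhile_not (p := (· == c)) (l := rest) (by simp [hd])
            have h2 : ((rest.dropWhile (· == c)).head (by simp [hd])) = h' := by simp [hd]
            rw [h2] at h1; simpa using h1
          have hng : (String.singleton h' == g) = false := by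
            by_contra hcon
            have h1 : String.singleton h' = g := eq_of_beq (by simpa using hcon)
            have h2 : String.singleton c = g := eq_of_beq hg
            have : h' = c := by
              have := congrArg String.toList (h1.trans h2.symm)
              simpa using this
            simp [this] at hne
          simp only [List.foldl_cons, sgsStep, hng, Bool.false_eq_true, if_false]
          rw [sgs_scan_decomp g tl (1 + ((rest.takeWhile (· == c)).length : Int)) 0 (by omega) (by omega)]
          have hrv : runLens g (h' :: tl) = runLens g tl := by
            rw [runLens]; simp [hng]
          have htl : tl.length ≤ n := by
            have h1 : (rest.dropWhile (· == c)).length ≤ rest.length := List.length_dropWhile_le _ _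
            rw [hd] at h1
            simp only [List.length_cons] at h1 hcs
            omega
          rw [ih tl htl, hrv]
          omega
      · simp only [List.foldl_cons, sgsStep, hg, Bool.false_eq_true, if_false]
        rw [runLens]
        simp only [hg, Bool.false_eq_true, if_false]
        exact ih rest (by simp only [List.length_cons] at hcs; omega)

-- run lengths are positive
theorem runLens_pos (g : String) : ∀ (n : Nat) (cs : List Char), cs.length ≤ n →
    ∀ k ∈ runLens g cs, 1 ≤ k := by
  intro n
  induction n with
  | zero =>
    intro cs hcs
    have : cs = [] := List.eq_nil_of_length_eq_zero (by omega)
    subst this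
    simp [runLens]
  | succ n ih =>
    intro cs hcs k hk
    match cs with
    | [] => simp [runLens] at hk
    | c :: rest =>
      rw [runLens] at hk
      split at hk
      · rcases List.mem_cons.mp hk with h | h
        · subst h; omega
        · have hlen : (rest.dropWhile (· == c)).length ≤ n := by
            have := List.length_dropWhile_le (· == c) rest
            simp only [List.length_cons] at hcs
            omega
          exact ih _ hlen k h
      · exact ih rest (by simp only [List.length_cons] at hcs; omega) k hk

-- B's per-sequence value equals A's per-sequence scan value
theorem maxGapRunB_eq (g : String) (cs : List Char) :
    maxGapRunB g cs = (cs.foldl (sgsStep g) (0, 0)).1 := by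
  have hb : maxGapRunB g cs
      = PySem.List.maxD (PySem.Dict.counter (keysSpec g cs 0 0)).values (fun v => v) 0 := by
    unfold maxGapRunB
    rw [PySem.Dict.foldl_insert_getD_add_one_eq_counter, gapKeys_eq]
  rw [hb, counter_keysSpec_values g cs.length cs le_rfl 0 0,
    sgs_scan_eq_runLens g cs.length cs le_rfl]
  match hr : runLens g cs with
  | [] => rfl
  | x :: t =>
    have hx : 1 ≤ x := runLens_pos g cs.length cs le_rfl x (by rw [hr]; simp)
    have h1 : PySem.List.max? (x :: t) (fun v => v) = some (t.foldl max x) :=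
      PySem.List.max?_id_cons x t
    have h2 := PySem.List.max?_eq_some_maxD (x :: t) (fun v => v) 0 (by simp)
    rw [h1] at h2
    have h3 : PySem.List.maxD (x :: t) (fun v => v) 0 = t.foldl max x := by
      exact (Option.some.injEq _ _).mp h2.symm
    rw [h3]
    simp only [List.foldl_cons]
    rw [show max (0 : Int) x = x from by omega]

-- the two min-folds agree
theorem min_fold_eq (g : String) (l : List (String × Int)) : ∀ (mn : Int),
    l.foldl (fun mn p => let mx := (p.1.toList.foldl (sgsStep g) (0, 0)).1; if mx < mn then mx else mn) mn
      = l.foldl (fun mn p => min mn (maxGapRunB g p.1.toList)) mn := by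
  induction l with
  | nil => intro mn; rfl
  | cons p l ih =>
    intro mn
    simp only [List.foldl_cons]
    rw [maxGapRunB_eq g p.1.toList]
    have : (let mx := (p.1.toList.foldl (sgsStep g) (0, 0)).1; if mx < mn then mx else mn)
        = min mn ((p.1.toList.foldl (sgsStep g) (0, 0)).1) := by
      simp only []
      omega
    rw [this, ih]

-- ===== VERDICT (by name: the statement is the Claim_ definition above) =====
theorem squeeze_gapped_seqs_spec : Claim_equal_squeeze_gapped_seqs := by
  intro l mg g _
  unfold Spec_squeeze_gapped_seqs
  unfold squeeze_gapped_seqs squeeze_gapped_seqs_alt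
  simp only []
  rw [min_fold_eq g l 888]
  set num := (l.foldl (fun mn p => min mn (maxGapRunB g p.1.toList)) 888) - mg with hnum
  by_cases h : num > 0
  · rw [if_pos h, if_neg (by omega)]
    exact List.zip_map' (l := l)
  · rw [if_neg h, if_pos (by omega)]
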